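-- pv_equiv track=rewrite | github.com/Blocky-mint/K | train/eval.py | clean_scad_code
-- ===== SOURCE A (Python) =====
-- def clean_scad_code(code):
--     """Clean up SCAD code by removing metadata and comments."""
--     lines = code.split('\n')
--     cleaned_lines = []
--     skip_header = True
--
--     for line in lines:
--         stripped = line.strip()
--
--         # Skip metadata lines starting with *
--         if stripped.startswith('*'):
--             continue
--
--         # Skip header comments at the beginning
--         if skip_header:
--             if stripped.startswith('//') or stripped == '':
--                 continue
--             else:
--                 skip_header = False
--
--         cleaned_lines.append(line)
--
--     return '\n'.join(cleaned_lines).strip()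
-- ===== SOURCE B (Python) =====
-- def clean_scad_code(code):
--     """Clean up SCAD code by removing metadata and comments."""
--     body = [line for line in code.split('\n')
--             if not line.strip().startswith('*')]
--     i = 0
--     while i < len(body) and (body[i].strip() == '' or body[i].strip().startswith('//')):
--         i += 1
--     return '\n'.join(body[i:]).strip()
-- ===== Notes on version B (the rewrite author's own statement) =====
-- stated objective: simpler
-- what changed: Replaces the single stateful pass with a skip_header flag by two separate passes: a filtering comprehension that removes asterisk-prefixed lines, then an index scan that drops the leading header run before joining a slice.
import Mathlib
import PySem

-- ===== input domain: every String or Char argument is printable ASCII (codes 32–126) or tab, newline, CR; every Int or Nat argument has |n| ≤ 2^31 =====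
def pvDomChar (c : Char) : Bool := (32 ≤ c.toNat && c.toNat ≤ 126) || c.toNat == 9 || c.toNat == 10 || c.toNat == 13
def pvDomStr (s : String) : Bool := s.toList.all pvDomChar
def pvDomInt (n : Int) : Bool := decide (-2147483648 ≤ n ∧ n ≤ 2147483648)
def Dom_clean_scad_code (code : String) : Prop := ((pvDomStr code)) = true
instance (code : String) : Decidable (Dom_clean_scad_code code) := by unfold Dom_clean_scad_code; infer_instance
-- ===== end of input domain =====

-- B replaces A's single stateful pass (skip_header flag) by two separate passes:
-- filter out '*'-lines, then drop the leading header run by index and join the slice.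

-- ===== PORT A =====
-- split? returns some for the non-empty separator "\n"; .getD [] never takes the default
def clean_scad_code (code : String) : String :=
  let lines := (PySem.Str.split? code "\n").getD []
  let st := lines.foldl (fun (st : List String × Bool) line =>
    let stripped := PySem.Str.strip line
    if PySem.Str.startswith stripped "*" then st
    else if st.2 then
      if PySem.Str.startswith stripped "//" || stripped == "" then st
      else (st.1 ++ [line], false)
    else (st.1 ++ [line], st.2)) ([], true)
  PySem.Str.strip (PySem.Str.join "\n" st.1)

-- ===== PORT B =====
def clean_scad_code_alt (code : String) : String :=
  let body := ((PySem.Str.split? code "\n").getD []).filter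
    (fun line => !(PySem.Str.startswith (PySem.Str.strip line) "*"))
  let i := body.findIdx (fun line =>
    !(PySem.Str.strip line == "" || PySem.Str.startswith (PySem.Str.strip line) "//"))
  PySem.Str.strip (PySem.Str.join "\n" (body.drop i))

-- ===== PRECONDITION & SPEC =====
def Spec_clean_scad_code (code : String) (out : String) : Prop := out = clean_scad_code_alt code
instance (code : String) (out : String) : Decidable (Spec_clean_scad_code code out) := by unfold Spec_clean_scad_code; infer_instance

-- ===== CLAIM (what is proved, stated in full; the proofs are below) =====
def Claim_equal_clean_scad_code : Prop := ∀ (code : String), Dom_clean_scad_code code → Spec_clean_scad_code code (clean_scad_code code)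

-- ===== LEMMAS AND PROOFS =====

-- predicates (proof-side abbreviations for A's tests)
def pvStar (line : String) : Bool := PySem.Str.startswith (PySem.Str.strip line) "*"
def pvHdr (line : String) : Bool :=
  PySem.Str.startswith (PySem.Str.strip line) "//" || PySem.Str.strip line == ""

def pvStep (st : List String × Bool) (line : String) : List String × Bool :=
  if pvStar line then st
  else if st.2 then
    if pvHdr line then st
    else (st.1 ++ [line], false)
  else (st.1 ++ [line], st.2)

-- once skip_header is off, A appends every non-'*' line
lemma pvFold_false (lines : List String) (acc : List String) :
    lines.foldl pvStep (acc, false)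
      = (acc ++ lines.filter (fun l => !pvStar l), false) := by
  induction lines generalizing acc with
  | nil => simp
  | cons l ls ih =>
    simp only [List.foldl_cons, List.filter_cons, pvStep]
    by_cases h : pvStar l = true
    · simp [h, ih]
    · simp [h, ih, List.append_assoc]

-- while skip_header is on, A drops the header run of the filtered list
lemma pvFold_true (lines : List String) (acc : List String) :
    lines.foldl pvStep (acc, true)
      = (acc ++ (lines.filter (fun l => !pvStar l)).dropWhile pvHdr,
         ((lines.filter (fun l => !pvStar l)).dropWhile pvHdr).isEmpty) := by
  induction lines generalizing acc with
  | nil => simp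
  | cons l ls ih =>
    simp only [List.foldl_cons, List.filter_cons, pvStep]
    by_cases h : pvStar l = true
    · simp [h, ih]
    · by_cases hh : pvHdr l = true
      · simp [h, hh, ih]
      · simp [h, hh, pvFold_false, List.append_assoc]

-- dropping at the first index failing pvHdr is dropWhile pvHdr
lemma pvDrop_findIdx (xs : List String) :
    xs.drop (xs.findIdx (fun l => !pvHdr l)) = xs.dropWhile pvHdr := by
  induction xs with
  | nil => simp
  | cons x xs ih =>
    by_cases h : pvHdr x = true
    · simp [List.findIdx_cons, h, ih]
    · simp [List.findIdx_cons, h]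

-- ===== VERDICT (by name: the statement is the Claim_ definition above) =====
theorem clean_scad_code_spec : Claim_equal_clean_scad_code := by
  intro code _
  unfold Spec_clean_scad_code clean_scad_code clean_scad_code_alt
  have hstep : (fun (st : List String × Bool) line =>
      let stripped := PySem.Str.strip line
      if PySem.Str.startswith stripped "*" then st
      else if st.2 then
        if PySem.Str.startswith stripped "//" || stripped == "" then st
        else (st.1 ++ [line], false)
      else (st.1 ++ [line], st.2)) = pvStep := by
    funext st line
    simp [pvStep, pvStar, pvHdr]
  simp only [hstep, pvFold_true, List.nil_append]
  have hp : (fun line => !(PySem.Str.startswith (PySem.Str.strip line) "*"))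
      = (fun l => !pvStar l) := by funext l; simp [pvStar]
  have hq : (fun line =>
      !(PySem.Str.strip line == "" || PySem.Str.startswith (PySem.Str.strip line) "//"))
      = (fun l => !pvHdr l) := by
    funext l; simp [pvHdr, Bool.or_comm]
  rw [hp, hq, pvDrop_findIdx]
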